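-- pv_equiv track=rewrite | github.com/capopaper/capo | scripts/final_pipeline/analysis_logic_links.py | create_final_annotation_files
-- ===== SOURCE A (Python) =====
-- def create_final_annotation_files(merged_groups_by_doc, all_annotators):
--     all_concept_ids = []
--     for doc_id, groups in sorted(merged_groups_by_doc.items()):
--         for i in range(len(groups)):
--             all_concept_ids.append(f"concept{doc_id}_{i+1}")
--
--     human_annotators = sorted([str(ann_id) for ann_id in all_annotators if str(ann_id) != 'LLM'])
--     humans_annotations = {
--         f"annotator{ann_id}": {concept_id: [False] for concept_id in all_concept_ids}
--         for ann_id in human_annotators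
--     }
--     LLM_annotations = {concept_id: [False] for concept_id in all_concept_ids}
--
--     for doc_id, merged_groups in sorted(merged_groups_by_doc.items()):
--         for i, group in enumerate(merged_groups):
--             concept_id = f"concept{doc_id}_{i+1}"
--             for annotator_id, contribution in group['contributions'].items():
--                 if len(contribution) > 0:
--                     if str(annotator_id) == 'LLM':
--                         if concept_id in LLM_annotations:
--                             LLM_annotations[concept_id] = [True]
--                     else:
--                         annotator_key = f"annotator{annotator_id}"
--                         if annotator_key in humans_annotations and concept_id in humans_annotations[annotator_key]:
--                             humans_annotations[annotator_key][concept_id] = [True]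
--     return humans_annotations, LLM_annotations
-- ===== SOURCE B (Python) =====
-- def create_final_annotation_files(merged_groups_by_doc, all_annotators):
--     # One pass over the sorted docs: collect the concept-id list and a set of
--     # (concept_id, contributor_key) pairs; then build both outputs by comprehensions.
--     all_concept_ids = []
--     contributed = set()
--     for doc_id, groups in sorted(merged_groups_by_doc.items()):
--         for i, group in enumerate(groups):
--             concept_id = f"concept{doc_id}_{i+1}"
--             all_concept_ids.append(concept_id)
--             for annotator_id, contribution in group['contributions'].items():
--                 if len(contribution) > 0:
--                     key = 'LLM' if str(annotator_id) == 'LLM' else f"annotator{annotator_id}"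
--                     contributed.add((concept_id, key))
--     human_annotators = sorted(str(a) for a in all_annotators if str(a) != 'LLM')
--     humans_annotations = {
--         f"annotator{a}": {cid: [(cid, f"annotator{a}") in contributed] for cid in all_concept_ids}
--         for a in human_annotators
--     }
--     LLM_annotations = {cid: [(cid, 'LLM') in contributed] for cid in all_concept_ids}
--     return humans_annotations, LLM_annotations
-- ===== Notes on version B (the rewrite author's own statement) =====
-- stated objective: simpler
-- what changed: B makes one pass over the sorted docs collecting the concept-id list and a set of (concept_id, contributor_key) pairs, then builds both outputs by pure comprehensions with membership tests, instead of A's pre-building all-False nested dicts and mutating them in a second sweep with containment guards.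
import Mathlib
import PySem

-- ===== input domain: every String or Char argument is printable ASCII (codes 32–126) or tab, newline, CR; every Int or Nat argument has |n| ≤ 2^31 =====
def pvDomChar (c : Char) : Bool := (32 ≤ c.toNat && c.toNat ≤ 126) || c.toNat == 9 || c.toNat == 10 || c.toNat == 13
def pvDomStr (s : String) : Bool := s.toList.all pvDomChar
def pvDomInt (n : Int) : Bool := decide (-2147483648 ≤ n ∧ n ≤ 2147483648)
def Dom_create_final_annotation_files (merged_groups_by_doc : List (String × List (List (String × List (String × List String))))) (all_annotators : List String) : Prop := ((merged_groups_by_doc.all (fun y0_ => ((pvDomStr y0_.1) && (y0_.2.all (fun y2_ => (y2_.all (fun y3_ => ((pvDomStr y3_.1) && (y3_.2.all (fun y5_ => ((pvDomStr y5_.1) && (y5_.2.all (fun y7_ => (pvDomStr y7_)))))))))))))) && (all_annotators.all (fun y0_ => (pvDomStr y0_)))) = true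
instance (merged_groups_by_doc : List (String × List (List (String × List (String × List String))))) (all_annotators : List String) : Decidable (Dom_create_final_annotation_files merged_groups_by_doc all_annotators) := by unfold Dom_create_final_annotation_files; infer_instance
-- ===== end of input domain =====

-- B replaces A's "pre-build all-False nested dicts, then mutate them in a guarded second sweep" by one
-- pass collecting the concept-id list and a set of (concept_id, contributor_key) pairs, then builds both
-- outputs directly by membership tests (objective: simpler; same asymptotic cost).

-- ===== PORT A =====
-- A-side helpers: each helper is one loop of the Python, transliterated
def pyA_sortedDocs (merged_groups_by_doc : List (String × List (List (String × List (String × List String))))) : List (String × List (List (String × List (String × List String)))) :=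
  PySem.List.sorted (PySem.Dict.ofList merged_groups_by_doc).items (fun p => p.1) false

def pyA_conceptIds (sortedDocs : List (String × List (List (String × List (String × List String))))) : List String :=
  sortedDocs.foldl (fun acc p =>
    (PySem.List.pyRange 0 (p.2.length : Int) 1).foldl (fun acc2 i =>
      acc2 ++ ["concept" ++ p.1 ++ "_" ++ PySem.Int.toStr (i + 1)]) acc) []

def pyA_humanAnnotators (all_annotators : List String) : List String :=
  PySem.List.sorted (all_annotators.filter (fun a => !(a == "LLM"))) (fun a => a) false

def pyA_inner0 (all_concept_ids : List String) : PySem.Dict String (List Bool) :=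
  all_concept_ids.foldl (fun d2 c => d2.insert c [false]) PySem.Dict.empty

def pyA_humans0 (human_annotators : List String) (all_concept_ids : List String) : PySem.Dict String (PySem.Dict String (List Bool)) :=
  human_annotators.foldl (fun d a => d.insert ("annotator" ++ a) (pyA_inner0 all_concept_ids)) PySem.Dict.empty

def pyA_llm0 (all_concept_ids : List String) : PySem.Dict String (List Bool) :=
  all_concept_ids.foldl (fun d c => d.insert c [false]) PySem.Dict.empty

-- the mutating second sweep of A; group['contributions'] on a missing key is a Python KeyError
-- (excluded by Pre_); getD [] below only totalizes that lookup
def pyA_loop (sortedDocs : List (String × List (List (String × List (String × List String)))))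
    (st0 : PySem.Dict String (PySem.Dict String (List Bool)) × PySem.Dict String (List Bool)) :
    PySem.Dict String (PySem.Dict String (List Bool)) × PySem.Dict String (List Bool) :=
  sortedDocs.foldl (fun st p =>
    (PySem.List.enumerate p.2 0).foldl (fun st2 ig =>
      ((PySem.Dict.ofList ((PySem.Dict.ofList ig.2).getD "contributions" [])).items).foldl
        (fun st3 ac =>
          if ac.2.length > 0 then
            if ac.1 == "LLM" then
              (st3.1, if st3.2.contains ("concept" ++ p.1 ++ "_" ++ PySem.Int.toStr (ig.1 + 1))
                      then st3.2.insert ("concept" ++ p.1 ++ "_" ++ PySem.Int.toStr (ig.1 + 1)) [true] else st3.2)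
            else
              (if st3.1.contains ("annotator" ++ ac.1) &&
                  ((st3.1.getD ("annotator" ++ ac.1) PySem.Dict.empty).contains ("concept" ++ p.1 ++ "_" ++ PySem.Int.toStr (ig.1 + 1)))
               then st3.1.insert ("annotator" ++ ac.1)
                      ((st3.1.getD ("annotator" ++ ac.1) PySem.Dict.empty).insert ("concept" ++ p.1 ++ "_" ++ PySem.Int.toStr (ig.1 + 1)) [true])
               else st3.1, st3.2)
          else st3) st2) st) st0

def create_final_annotation_files (merged_groups_by_doc : List (String × List (List (String × List (String × List String))))) (all_annotators : List String) : (List (String × List (String × List Bool))) × (List (String × List Bool)) :=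
  let sortedDocs := pyA_sortedDocs merged_groups_by_doc
  let all_concept_ids := pyA_conceptIds sortedDocs
  let human_annotators := pyA_humanAnnotators all_annotators
  let final := pyA_loop sortedDocs (pyA_humans0 human_annotators all_concept_ids, pyA_llm0 all_concept_ids)
  ((final.1.items).map (fun p => (p.1, p.2.items)), final.2.items)

-- ===== PORT B =====
-- B-side helpers: the single collecting pass and the two comprehensions of Source B
def pyB_sortedDocs (merged_groups_by_doc : List (String × List (List (String × List (String × List String))))) : List (String × List (List (String × List (String × List String)))) :=
  PySem.List.sorted (PySem.Dict.ofList merged_groups_by_doc).items (fun p => p.1) false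

-- one pass: (all_concept_ids, contributed) ; same totalizing getD [] on group['contributions']
def pyB_pass (sortedDocs : List (String × List (List (String × List (String × List String))))) :
    List String × PySem.Set (String × String) :=
  sortedDocs.foldl (fun st p =>
    (PySem.List.enumerate p.2 0).foldl (fun st2 ig =>
      (st2.1 ++ ["concept" ++ p.1 ++ "_" ++ PySem.Int.toStr (ig.1 + 1)],
       ((PySem.Dict.ofList ((PySem.Dict.ofList ig.2).getD "contributions" [])).items).foldl
         (fun s ac =>
           if ac.2.length > 0 then
             PySem.Set.add s ("concept" ++ p.1 ++ "_" ++ PySem.Int.toStr (ig.1 + 1),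
                              if ac.1 == "LLM" then "LLM" else "annotator" ++ ac.1)
           else s) st2.2)) st)
    (([] : List String), (PySem.Set.empty : PySem.Set (String × String)))

def pyB_humanAnnotators (all_annotators : List String) : List String :=
  PySem.List.sorted (all_annotators.filter (fun a => !(a == "LLM"))) (fun a => a) false

def pyB_inner (all_concept_ids : List String) (contributed : PySem.Set (String × String)) (K : String) : PySem.Dict String (List Bool) :=
  all_concept_ids.foldl (fun d2 c => d2.insert c [PySem.Set.contains contributed (c, K)]) PySem.Dict.empty

def pyB_humans (human_annotators : List String) (all_concept_ids : List String) (contributed : PySem.Set (String × String)) : PySem.Dict String (PySem.Dict String (List Bool)) :=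
  human_annotators.foldl (fun d a => d.insert ("annotator" ++ a) (pyB_inner all_concept_ids contributed ("annotator" ++ a))) PySem.Dict.empty

def pyB_llm (all_concept_ids : List String) (contributed : PySem.Set (String × String)) : PySem.Dict String (List Bool) :=
  all_concept_ids.foldl (fun d c => d.insert c [PySem.Set.contains contributed (c, "LLM")]) PySem.Dict.empty

def create_final_annotation_files_alt (merged_groups_by_doc : List (String × List (List (String × List (String × List String))))) (all_annotators : List String) : (List (String × List (String × List Bool))) × (List (String × List Bool)) :=
  let acc := pyB_pass (pyB_sortedDocs merged_groups_by_doc)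
  let human_annotators := pyB_humanAnnotators all_annotators
  let humans := pyB_humans human_annotators acc.1 acc.2
  ((humans.items).map (fun p => (p.1, p.2.items)), (pyB_llm acc.1 acc.2).items)

-- ===== PRECONDITION & SPEC =====
-- A indexes group['contributions']: Pre_ excludes exactly the inputs where some group kept by the
-- (deduplicating) doc dict is missing the key 'contributions' (Python KeyError).
def Pre_create_final_annotation_files (merged_groups_by_doc : List (String × List (List (String × List (String × List String))))) (all_annotators : List String) : Prop :=
  ∀ p ∈ (PySem.Dict.ofList merged_groups_by_doc).items, ∀ g ∈ p.2, (g.map Prod.fst).contains "contributions" = true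
instance (merged_groups_by_doc : List (String × List (List (String × List (String × List String))))) (all_annotators : List String) : Decidable (Pre_create_final_annotation_files merged_groups_by_doc all_annotators) := by unfold Pre_create_final_annotation_files; infer_instance
def pvWitness_create_final_annotation_files : (List (String × List (List (String × List (String × List String))))) × List String :=
  ([("d1", [[("contributions", [("1", ["x"]), ("LLM", [])])], [("contributions", [("2", ["y"])])]])], ["1", "2", "LLM"])
def Spec_create_final_annotation_files (merged_groups_by_doc : List (String × List (List (String × List (String × List String))))) (all_annotators : List String) (out : (List (String × List (String × List Bool))) × (List (String × List Bool))) : Prop := out = create_final_annotation_files_alt merged_groups_by_doc all_annotators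
instance (merged_groups_by_doc : List (String × List (List (String × List (String × List String))))) (all_annotators : List String) (out : (List (String × List (String × List Bool))) × (List (String × List Bool))) : Decidable (Spec_create_final_annotation_files merged_groups_by_doc all_annotators out) := by unfold Spec_create_final_annotation_files; infer_instance

-- ===== CLAIM (what is proved, stated in full; the proofs are below) =====
def Claim_equal_create_final_annotation_files : Prop := ∀ (merged_groups_by_doc : List (String × List (List (String × List (String × List String))))) (all_annotators : List String), Dom_create_final_annotation_files merged_groups_by_doc all_annotators → Pre_create_final_annotation_files merged_groups_by_doc all_annotators → Spec_create_final_annotation_files merged_groups_by_doc all_annotators (create_final_annotation_files merged_groups_by_doc all_annotators)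

-- ===== LEMMAS AND PROOFS =====
-- proof-side normal forms: flattened event list and A's mutation step
def pvCid (d : String) (i : Int) : String := "concept" ++ d ++ "_" ++ PySem.Int.toStr (i + 1)
def pvContribs (g : List (String × List (String × List String))) : List (String × List String) :=
  (PySem.Dict.ofList ((PySem.Dict.ofList g).getD "contributions" [])).items
def pvRawE (sd : List (String × List (List (String × List (String × List String))))) : List (String × String × List String) :=
  sd.flatMap (fun p => (PySem.List.enumerate p.2 0).flatMap (fun ig => (pvContribs ig.2).map (fun ac => (pvCid p.1 ig.1, ac))))
def pvC (sd : List (String × List (List (String × List (String × List String))))) : List String :=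
  sd.flatMap (fun p => (PySem.List.enumerate p.2 0).map (fun ig => pvCid p.1 ig.1))
def pvStepA (st : PySem.Dict String (PySem.Dict String (List Bool)) × PySem.Dict String (List Bool))
    (e : String × String × List String) : PySem.Dict String (PySem.Dict String (List Bool)) × PySem.Dict String (List Bool) :=
  match st, e with
  | (H, L), (cid, aid, contribution) =>
    if contribution.length > 0 then
      if aid == "LLM" then
        (H, if L.contains cid then L.insert cid [true] else L)
      else
        (if H.contains ("annotator" ++ aid) && ((H.getD ("annotator" ++ aid) PySem.Dict.empty).contains cid)
         then H.insert ("annotator" ++ aid) ((H.getD ("annotator" ++ aid) PySem.Dict.empty).insert cid [true])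
         else H, L)
    else (H, L)

theorem pv_annKey_ne_LLM (a : String) : ("annotator" ++ a) ≠ "LLM" := by
  intro h; have h2 := congrArg String.toList h; simp [String.toList_append] at h2

theorem pv_getD_foldl_insert {α κ ν : Type} [BEq κ] [LawfulBEq κ] [DecidableEq κ]
    (l : List α) (key : α → κ) (v : κ → ν) (K : κ) (dflt : ν) :
    ∀ d : PySem.Dict κ ν,
    (List.foldl (fun d x => d.insert (key x) (v (key x))) d l).getD K dflt =
      if K ∈ l.map key then v K else d.getD K dflt := by
  induction l with
  | nil => simp
  | cons x t ih =>
    intro d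
    simp only [List.foldl_cons, List.map_cons, List.mem_cons]
    rw [ih]
    by_cases h : K ∈ t.map key
    · simp [h]
    · by_cases hx : K = key x <;> simp [h, hx, PySem.Dict.getD_insert]

theorem pv_mem_foldl_add {α β : Type} [BEq α] [LawfulBEq α]
    (E : List β) (act : β → Prop) [DecidablePred act] (f : β → α) :
    ∀ (s : PySem.Set α) (x : α),
    (x ∈ E.foldl (fun s e => if act e then PySem.Set.add s (f e) else s) s) ↔
      x ∈ s ∨ ∃ e ∈ E, act e ∧ x = f e := by
  induction E with
  | nil => simp
  | cons e t ih =>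
    intro s x
    simp only [List.foldl_cons, List.mem_cons]
    rw [ih]
    by_cases h : act e <;> (simp [h, PySem.Set.mem_add] <;> tauto)

theorem pv_stepA_keys1 (st : PySem.Dict String (PySem.Dict String (List Bool)) × PySem.Dict String (List Bool))
    (e : String × String × List String) : ((pvStepA st e).1).keys = st.1.keys := by
  obtain ⟨H, L⟩ := st
  obtain ⟨cid, aid, contribution⟩ := e
  simp only [pvStepA]
  split_ifs <;> try rfl
  all_goals
    (rename_i hg
     simp only [Bool.and_eq_true] at hg
     exact PySem.Dict.keys_insert_of_contains _ _ hg.1)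

theorem pv_stepA_keysL (st : PySem.Dict String (PySem.Dict String (List Bool)) × PySem.Dict String (List Bool))
    (e : String × String × List String) : ((pvStepA st e).2).keys = st.2.keys := by
  obtain ⟨H, L⟩ := st
  obtain ⟨cid, aid, contribution⟩ := e
  simp only [pvStepA]
  split_ifs <;> try rfl
  all_goals (rename_i hg; exact PySem.Dict.keys_insert_of_contains _ _ hg)

theorem pv_stepA_keys2 (st : PySem.Dict String (PySem.Dict String (List Bool)) × PySem.Dict String (List Bool))
    (e : String × String × List String) (K : String) :
    (((pvStepA st e).1).getD K PySem.Dict.empty).keys = (st.1.getD K PySem.Dict.empty).keys := by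
  obtain ⟨H, L⟩ := st
  obtain ⟨cid, aid, contribution⟩ := e
  simp only [pvStepA]
  split_ifs <;> try rfl
  all_goals
    (rename_i hg
     simp only [Bool.and_eq_true] at hg
     show ((H.insert ("annotator" ++ aid) ((H.getD ("annotator" ++ aid) PySem.Dict.empty).insert cid [true])).getD K PySem.Dict.empty).keys = _
     rw [PySem.Dict.getD_insert]
     by_cases hKe : K = "annotator" ++ aid
     · rw [if_pos hKe, hKe]
       exact PySem.Dict.keys_insert_of_contains _ _ hg.2
     · rw [if_neg hKe])

theorem pv_stepA_getD (st : PySem.Dict String (PySem.Dict String (List Bool)) × PySem.Dict String (List Bool))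
    (e : String × String × List String) (K c : String)
    (hK : st.1.contains K = true) (hc : (st.1.getD K PySem.Dict.empty).contains c = true) :
    (((pvStepA st e).1).getD K PySem.Dict.empty).getD c [] =
      if e.2.2.length > 0 ∧ e.2.1 ≠ "LLM" ∧ "annotator" ++ e.2.1 = K ∧ e.1 = c then [true]
      else (st.1.getD K PySem.Dict.empty).getD c [] := by
  obtain ⟨H, L⟩ := st
  obtain ⟨cid, aid, contribution⟩ := e
  simp only at hK hc
  by_cases h1 : contribution.length > 0
  · by_cases h2 : aid = "LLM"
    · simp [pvStepA, h1, h2]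
    · by_cases hKe : ("annotator" ++ aid) = K
      · have hce'' : ∀ x : String, ¬ x = c → c ≠ x := fun x h hx => h hx.symm
        by_cases hce : cid = c
        · simp [pvStepA, h1, h2, hKe, hce, hK, hc]
        · have hce' : c ≠ cid := hce'' _ hce
          by_cases hg2 : (H.getD K PySem.Dict.empty).contains cid = true
          · simp [pvStepA, h1, h2, hKe, hce, hK, hg2, hce', PySem.Dict.getD_insert]
          · simp [pvStepA, h1, h2, hKe, hce, hK, hg2]
      · have hKe' : K ≠ "annotator" ++ aid := fun hx => hKe hx.symm
        rw [if_neg (by rintro ⟨_, _, hx, _⟩; exact hKe hx)]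
        simp only [pvStepA]
        rw [if_pos h1, if_neg (by simpa using h2)]
        simp only []
        split_ifs with hg
        · rw [PySem.Dict.getD_insert, if_neg hKe']
        · rfl
  · simp [pvStepA, h1]

theorem pv_stepA_getDL (st : PySem.Dict String (PySem.Dict String (List Bool)) × PySem.Dict String (List Bool))
    (e : String × String × List String) (c : String) (hc : st.2.contains c = true) :
    ((pvStepA st e).2).getD c [] =
      if e.2.2.length > 0 ∧ e.2.1 = "LLM" ∧ e.1 = c then [true] else st.2.getD c [] := by
  obtain ⟨H, L⟩ := st
  obtain ⟨cid, aid, contribution⟩ := e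
  simp only at hc
  by_cases h1 : contribution.length > 0
  · by_cases h2 : aid = "LLM"
    · by_cases hce : cid = c
      · simp [pvStepA, h1, h2, hce, hc]
      · have hce' : c ≠ cid := fun hx => hce hx.symm
        by_cases hg : L.contains cid = true
        · simp [pvStepA, h1, h2, hce, hce', hg, PySem.Dict.getD_insert]
        · simp only [Bool.not_eq_true] at hg
          simp [pvStepA, h1, h2, hce, hg]
    · simp [pvStepA, h1, h2]
  · simp [pvStepA, h1]

theorem pv_foldA_keys1 (E : List (String × String × List String)) :
    ∀ st, ((E.foldl pvStepA st).1).keys = st.1.keys := by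
  induction E with
  | nil => intro st; rfl
  | cons e t ih => intro st; rw [List.foldl_cons, ih, pv_stepA_keys1]

theorem pv_foldA_keysL (E : List (String × String × List String)) :
    ∀ st, ((E.foldl pvStepA st).2).keys = st.2.keys := by
  induction E with
  | nil => intro st; rfl
  | cons e t ih => intro st; rw [List.foldl_cons, ih, pv_stepA_keysL]

theorem pv_foldA_keys2 (E : List (String × String × List String)) :
    ∀ st K, (((E.foldl pvStepA st).1).getD K PySem.Dict.empty).keys = (st.1.getD K PySem.Dict.empty).keys := by
  induction E with
  | nil => intro st K; rfl
  | cons e t ih => intro st K; rw [List.foldl_cons, ih, pv_stepA_keys2]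

theorem pv_foldA_getD (E : List (String × String × List String)) :
    ∀ st K c, st.1.contains K = true → (st.1.getD K PySem.Dict.empty).contains c = true →
    ((E.foldl pvStepA st).1.getD K PySem.Dict.empty).getD c [] =
      if ∃ e ∈ E, e.2.2.length > 0 ∧ e.2.1 ≠ "LLM" ∧ "annotator" ++ e.2.1 = K ∧ e.1 = c then [true]
      else (st.1.getD K PySem.Dict.empty).getD c [] := by
  induction E with
  | nil => intro st K c _ _; simp
  | cons e t ih =>
    intro st K c hK hc
    have hK' : (pvStepA st e).1.contains K = true := by
      rw [PySem.Dict.contains_iff_mem_keys, pv_stepA_keys1]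
      exact (PySem.Dict.contains_iff_mem_keys _ _).mp hK
    have hc' : ((pvStepA st e).1.getD K PySem.Dict.empty).contains c = true := by
      rw [PySem.Dict.contains_iff_mem_keys, pv_stepA_keys2]
      exact (PySem.Dict.contains_iff_mem_keys _ _).mp hc
    rw [List.foldl_cons, ih _ K c hK' hc', pv_stepA_getD st e K c hK hc]
    by_cases h1 : (∃ e' ∈ t, e'.2.2.length > 0 ∧ e'.2.1 ≠ "LLM" ∧ "annotator" ++ e'.2.1 = K ∧ e'.1 = c) <;>
      by_cases h2 : (e.2.2.length > 0 ∧ e.2.1 ≠ "LLM" ∧ "annotator" ++ e.2.1 = K ∧ e.1 = c) <;>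
        simp [h1, h2, List.mem_cons, or_and_right, exists_or]

theorem pv_foldA_getDL (E : List (String × String × List String)) :
    ∀ st c, st.2.contains c = true →
    ((E.foldl pvStepA st).2).getD c [] =
      if ∃ e ∈ E, e.2.2.length > 0 ∧ e.2.1 = "LLM" ∧ e.1 = c then [true] else st.2.getD c [] := by
  induction E with
  | nil => intro st c _; simp
  | cons e t ih =>
    intro st c hc
    have hc' : (pvStepA st e).2.contains c = true := by
      rw [PySem.Dict.contains_iff_mem_keys, pv_stepA_keysL]
      exact (PySem.Dict.contains_iff_mem_keys _ _).mp hc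
    rw [List.foldl_cons, ih _ c hc', pv_stepA_getDL st e c hc]
    by_cases h1 : (∃ e' ∈ t, e'.2.2.length > 0 ∧ e'.2.1 = "LLM" ∧ e'.1 = c) <;>
      by_cases h2 : (e.2.2.length > 0 ∧ e.2.1 = "LLM" ∧ e.1 = c) <;>
        simp [h1, h2, List.mem_cons, or_and_right, exists_or]

def pvKeyOf (aid : String) : String := if aid == "LLM" then "LLM" else "annotator" ++ aid

def pvSetB (sd : List (String × List (List (String × List (String × List String))))) : PySem.Set (String × String) :=
  (pvRawE sd).foldl (fun s e => if e.2.2.length > 0 then PySem.Set.add s (e.1, pvKeyOf e.2.1) else s) PySem.Set.empty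

-- shape lemmas: the ports' nested loops are folds over the flattened event list pvRawE
theorem pv_conceptsA_eq (sd : List (String × List (List (String × List (String × List String))))) :
    pyA_conceptIds sd = pvC sd := by
  unfold pyA_conceptIds pvC
  have h1 : ∀ (p : String × List (List (String × List (String × List String)))) (acc : List String),
      (PySem.List.pyRange 0 (p.2.length : Int) 1).foldl (fun acc2 i =>
        acc2 ++ ["concept" ++ p.1 ++ "_" ++ PySem.Int.toStr (i + 1)]) acc
      = acc ++ (PySem.List.enumerate p.2 0).map (fun ig => pvCid p.1 ig.1) := by
    intro p acc
    rw [PySem.List.foldl_append_singleton_eq_map]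
    congr 1
    have h2 := PySem.List.map_fst_enumerate p.2 0
    simp only [zero_add] at h2
    rw [← h2, List.map_map]
    simp [pvCid, Function.comp]
  trans (sd.foldl (fun acc p => acc ++ (PySem.List.enumerate p.2 0).map (fun ig => pvCid p.1 ig.1)) [])
  · exact PySem.List.foldl_congr_mem _ _ _ _ (fun acc p _ => h1 p acc)
  · rw [PySem.List.foldl_append_eq_flatMap]
    simp

theorem pv_A_flatten (sd : List (String × List (List (String × List (String × List String)))))
    (st0 : PySem.Dict String (PySem.Dict String (List Bool)) × PySem.Dict String (List Bool)) :
    pyA_loop sd st0 = (pvRawE sd).foldl pvStepA st0 := by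
  unfold pyA_loop pvRawE
  rw [List.foldl_flatMap]
  apply PySem.List.foldl_congr_mem
  intro acc p _
  rw [List.foldl_flatMap]
  apply PySem.List.foldl_congr_mem
  intro acc2 ig _
  rw [List.foldl_map]
  unfold pvContribs
  apply PySem.List.foldl_congr_mem
  intro acc3 ac _
  obtain ⟨H, L⟩ := acc3
  obtain ⟨aid, contribution⟩ := ac
  rfl

theorem pv_B_flatten (sd : List (String × List (List (String × List (String × List String))))) :
    pyB_pass sd = (pvC sd, pvSetB sd) := by
  unfold pyB_pass
  have hsplit : ∀ (st : List String × PySem.Set (String × String))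
      (p : String × List (List (String × List (String × List String)))),
      (PySem.List.enumerate p.2 0).foldl (fun st2 ig =>
        (st2.1 ++ ["concept" ++ p.1 ++ "_" ++ PySem.Int.toStr (ig.1 + 1)],
         ((PySem.Dict.ofList ((PySem.Dict.ofList ig.2).getD "contributions" [])).items).foldl
           (fun s ac =>
             if ac.2.length > 0 then
               PySem.Set.add s ("concept" ++ p.1 ++ "_" ++ PySem.Int.toStr (ig.1 + 1),
                                if ac.1 == "LLM" then "LLM" else "annotator" ++ ac.1)
             else s) st2.2)) st
      = ((PySem.List.enumerate p.2 0).foldl (fun acc ig => acc ++ ["concept" ++ p.1 ++ "_" ++ PySem.Int.toStr (ig.1 + 1)]) st.1,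
         (PySem.List.enumerate p.2 0).foldl (fun s ig =>
           ((PySem.Dict.ofList ((PySem.Dict.ofList ig.2).getD "contributions" [])).items).foldl
             (fun s ac =>
               if ac.2.length > 0 then
                 PySem.Set.add s ("concept" ++ p.1 ++ "_" ++ PySem.Int.toStr (ig.1 + 1),
                                  if ac.1 == "LLM" then "LLM" else "annotator" ++ ac.1)
               else s) s) st.2) := by
    intro st p
    rw [← PySem.List.foldl_prod_mk
      (f := fun acc (ig : Int × List (String × List (String × List String))) => acc ++ ["concept" ++ p.1 ++ "_" ++ PySem.Int.toStr (ig.1 + 1)])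
      (g := fun s (ig : Int × List (String × List (String × List String))) =>
        ((PySem.Dict.ofList ((PySem.Dict.ofList ig.2).getD "contributions" [])).items).foldl
          (fun s ac =>
            if ac.2.length > 0 then
              PySem.Set.add s ("concept" ++ p.1 ++ "_" ++ PySem.Int.toStr (ig.1 + 1),
                               if ac.1 == "LLM" then "LLM" else "annotator" ++ ac.1)
            else s) s)]
  rw [show (([] : List String), (PySem.Set.empty : PySem.Set (String × String))) = ((([] : List String), (PySem.Set.empty : PySem.Set (String × String))) : List String × PySem.Set (String × String)) from rfl]
  trans
  · exact PySem.List.foldl_congr_mem _ _ _ _ (fun st p _ => hsplit st p)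
  rw [PySem.List.foldl_prod_mk
    (f := fun acc (p : String × List (List (String × List (String × List String)))) =>
      (PySem.List.enumerate p.2 0).foldl (fun acc ig => acc ++ ["concept" ++ p.1 ++ "_" ++ PySem.Int.toStr (ig.1 + 1)]) acc)
    (g := fun s (p : String × List (List (String × List (String × List String)))) =>
      (PySem.List.enumerate p.2 0).foldl (fun s ig =>
        ((PySem.Dict.ofList ((PySem.Dict.ofList ig.2).getD "contributions" [])).items).foldl
          (fun s ac =>
            if ac.2.length > 0 then
              PySem.Set.add s ("concept" ++ p.1 ++ "_" ++ PySem.Int.toStr (ig.1 + 1),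
                               if ac.1 == "LLM" then "LLM" else "annotator" ++ ac.1)
            else s) s) s)]
  simp only [Prod.mk.injEq]
  constructor
  · -- first component: the concept-id list
    unfold pvC
    have h1 : ∀ (p : String × List (List (String × List (String × List String)))) (acc : List String),
        (PySem.List.enumerate p.2 0).foldl (fun acc ig => acc ++ ["concept" ++ p.1 ++ "_" ++ PySem.Int.toStr (ig.1 + 1)]) acc
        = acc ++ (PySem.List.enumerate p.2 0).map (fun ig => pvCid p.1 ig.1) := by
      intro p acc
      rw [PySem.List.foldl_append_singleton_eq_map]
      rfl
    trans (sd.foldl (fun acc p => acc ++ (PySem.List.enumerate p.2 0).map (fun ig => pvCid p.1 ig.1)) [])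
    · exact PySem.List.foldl_congr_mem _ _ _ _ (fun acc p _ => h1 p acc)
    · rw [PySem.List.foldl_append_eq_flatMap]
      simp
  · -- second component: the contributed set
    unfold pvSetB pvRawE
    rw [List.foldl_flatMap]
    apply PySem.List.foldl_congr_mem
    intro s p _
    rw [List.foldl_flatMap]
    apply PySem.List.foldl_congr_mem
    intro s2 ig _
    rw [List.foldl_map]
    unfold pvContribs
    apply PySem.List.foldl_congr_mem
    intro s3 ac _
    obtain ⟨aid, contribution⟩ := ac
    rfl

theorem pv_update_nil {α : Type} [BEq α] (l : List α) :
    PySem.Set.update ([] : PySem.Set α) l = PySem.Set.ofList l := by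
  rw [PySem.Set.ofList_eq_foldl]; rfl

theorem pv_inner0_keys (C : List String) : (pyA_inner0 C).keys = PySem.Set.ofList C := by
  unfold pyA_inner0
  rw [PySem.Dict.keys_foldl_insert, PySem.Dict.keys_empty, pv_update_nil]

theorem pv_inner0_getD (C : List String) (c : String) (hc : c ∈ C) :
    (pyA_inner0 C).getD c [] = [false] := by
  unfold pyA_inner0
  have h := pv_getD_foldl_insert C (fun c => c) (fun _ => [false]) c ([] : List Bool) PySem.Dict.empty
  simp only [] at h
  rw [h]
  simp [hc]

theorem pv_llm0_eq (C : List String) : pyA_llm0 C = pyA_inner0 C := rfl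

theorem pv_innerB_keys (C : List String) (S : PySem.Set (String × String)) (K : String) :
    (pyB_inner C S K).keys = PySem.Set.ofList C := by
  unfold pyB_inner
  rw [PySem.Dict.keys_foldl_insert, PySem.Dict.keys_empty, pv_update_nil]

theorem pv_innerB_getD (C : List String) (S : PySem.Set (String × String)) (K c : String) (hc : c ∈ C) :
    (pyB_inner C S K).getD c [] = [PySem.Set.contains S (c, K)] := by
  unfold pyB_inner
  have h := pv_getD_foldl_insert C (fun c => c) (fun c => [PySem.Set.contains S (c, K)]) c ([] : List Bool) PySem.Dict.empty
  simp only [] at h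
  rw [h]
  simp [hc]

theorem pv_llmB_eq (C : List String) (S : PySem.Set (String × String)) : pyB_llm C S = pyB_inner C S "LLM" := rfl

theorem pv_humans0_keys (hum C : List String) :
    (pyA_humans0 hum C).keys = PySem.Set.ofList (hum.map (fun a => "annotator" ++ a)) := by
  unfold pyA_humans0
  rw [PySem.Dict.keys_foldl_insert_key hum (fun a => "annotator" ++ a) (fun _ _ => pyA_inner0 C),
      PySem.Dict.keys_empty, pv_update_nil]

theorem pv_humans0_getD (hum C : List String) (K : String) (hK : K ∈ hum.map (fun a => "annotator" ++ a)) :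
    (pyA_humans0 hum C).getD K PySem.Dict.empty = pyA_inner0 C := by
  unfold pyA_humans0
  have h := pv_getD_foldl_insert hum (fun a => "annotator" ++ a) (fun _ => pyA_inner0 C) K PySem.Dict.empty PySem.Dict.empty
  simp only [] at h
  rw [h, if_pos hK]

theorem pv_humansB_keys (hum C : List String) (S : PySem.Set (String × String)) :
    (pyB_humans hum C S).keys = PySem.Set.ofList (hum.map (fun a => "annotator" ++ a)) := by
  unfold pyB_humans
  rw [PySem.Dict.keys_foldl_insert_key hum (fun a => "annotator" ++ a) (fun _ a => pyB_inner C S ("annotator" ++ a)),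
      PySem.Dict.keys_empty, pv_update_nil]

theorem pv_humansB_getD (hum C : List String) (S : PySem.Set (String × String)) (K : String)
    (hK : K ∈ hum.map (fun a => "annotator" ++ a)) :
    (pyB_humans hum C S).getD K PySem.Dict.empty = pyB_inner C S K := by
  unfold pyB_humans
  have h := pv_getD_foldl_insert hum (fun a => "annotator" ++ a) (fun K => pyB_inner C S K) K PySem.Dict.empty PySem.Dict.empty
  simp only [] at h
  rw [h, if_pos hK]

theorem pv_mem_setB (sd : List (String × List (List (String × List (String × List String))))) (x : String × String) :
    x ∈ pvSetB sd ↔ ∃ e ∈ pvRawE sd, e.2.2.length > 0 ∧ x = (e.1, pvKeyOf e.2.1) := by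
  unfold pvSetB
  rw [pv_mem_foldl_add (pvRawE sd) (fun e => e.2.2.length > 0) (fun e => (e.1, pvKeyOf e.2.1))]
  simp [PySem.Set.empty]

theorem pv_bridge_human (sd : List (String × List (List (String × List (String × List String))))) (a c : String) :
    (PySem.Set.contains (pvSetB sd) (c, "annotator" ++ a) = true) ↔
      (∃ e ∈ pvRawE sd, e.2.2.length > 0 ∧ e.2.1 ≠ "LLM" ∧ "annotator" ++ e.2.1 = "annotator" ++ a ∧ e.1 = c) := by
  rw [PySem.Set.contains_iff, pv_mem_setB]
  constructor
  · rintro ⟨e, he, hlen, hxe⟩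
    have h1 : c = e.1 := congrArg Prod.fst hxe
    have h2 : "annotator" ++ a = pvKeyOf e.2.1 := congrArg Prod.snd hxe
    unfold pvKeyOf at h2
    by_cases hllm : e.2.1 == "LLM"
    · rw [if_pos hllm] at h2; exact absurd h2 (pv_annKey_ne_LLM a)
    · rw [if_neg hllm] at h2
      exact ⟨e, he, hlen, by simpa using hllm, h2.symm, h1.symm⟩
  · rintro ⟨e, he, hlen, hne, hkey, hcid⟩
    refine ⟨e, he, hlen, ?_⟩
    unfold pvKeyOf
    rw [if_neg (by simpa using hne), hkey, hcid]

theorem pv_bridge_llm (sd : List (String × List (List (String × List (String × List String))))) (c : String) :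
    (PySem.Set.contains (pvSetB sd) (c, "LLM") = true) ↔
      (∃ e ∈ pvRawE sd, e.2.2.length > 0 ∧ e.2.1 = "LLM" ∧ e.1 = c) := by
  rw [PySem.Set.contains_iff, pv_mem_setB]
  constructor
  · rintro ⟨e, he, hlen, hxe⟩
    have h1 : c = e.1 := congrArg Prod.fst hxe
    have h2 : "LLM" = pvKeyOf e.2.1 := congrArg Prod.snd hxe
    unfold pvKeyOf at h2
    by_cases hllm : e.2.1 == "LLM"
    · exact ⟨e, he, hlen, by simpa using hllm, h1.symm⟩
    · rw [if_neg hllm] at h2; exact absurd h2.symm (pv_annKey_ne_LLM e.2.1)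
  · rintro ⟨e, he, hlen, heq, hcid⟩
    refine ⟨e, he, hlen, ?_⟩
    unfold pvKeyOf
    rw [if_pos (by simpa using heq), hcid]

theorem pv_core (sd : List (String × List (List (String × List (String × List String))))) (hum : List String) :
    ((((pvRawE sd).foldl pvStepA (pyA_humans0 hum (pvC sd), pyA_llm0 (pvC sd))).1.items).map (fun p => (p.1, p.2.items)),
      ((pvRawE sd).foldl pvStepA (pyA_humans0 hum (pvC sd), pyA_llm0 (pvC sd))).2.items)
    = (((pyB_humans hum (pvC sd) (pvSetB sd)).items).map (fun p => (p.1, p.2.items)),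
       (pyB_llm (pvC sd) (pvSetB sd)).items) := by
  simp only [Prod.mk.injEq]
  constructor
  · -- humans component
    have hkeysF : ((pvRawE sd).foldl pvStepA (pyA_humans0 hum (pvC sd), pyA_llm0 (pvC sd))).1.keys
        = PySem.Set.ofList (hum.map (fun a => "annotator" ++ a)) := by
      rw [pv_foldA_keys1]; exact pv_humans0_keys hum (pvC sd)
    have hkeysB : (pyB_humans hum (pvC sd) (pvSetB sd)).keys = PySem.Set.ofList (hum.map (fun a => "annotator" ++ a)) :=
      pv_humansB_keys hum (pvC sd) (pvSetB sd)
    have hndF : ((pvRawE sd).foldl pvStepA (pyA_humans0 hum (pvC sd), pyA_llm0 (pvC sd))).1.keys.Nodup := by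
      rw [hkeysF]; exact PySem.Set.nodup_ofList _
    have hndB : (pyB_humans hum (pvC sd) (pvSetB sd)).keys.Nodup := by
      rw [hkeysB]; exact PySem.Set.nodup_ofList _
    rw [PySem.Dict.items_eq_map_keys _ hndF PySem.Dict.empty,
        PySem.Dict.items_eq_map_keys _ hndB PySem.Dict.empty, hkeysF, hkeysB, List.map_map, List.map_map]
    apply List.map_congr_left
    intro K hKs
    have hKmem : K ∈ hum.map (fun a => "annotator" ++ a) := (PySem.Set.mem_ofList _ _).mp hKs
    obtain ⟨a, _, hKa⟩ := List.mem_map.mp hKmem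
    simp only [Function.comp, Prod.mk.injEq, true_and]
    -- inner dicts
    rw [pv_humansB_getD hum (pvC sd) (pvSetB sd) K hKmem]
    have hH0K : (pyA_humans0 hum (pvC sd)).getD K PySem.Dict.empty = pyA_inner0 (pvC sd) :=
      pv_humans0_getD hum (pvC sd) K hKmem
    have hcontK : (pyA_humans0 hum (pvC sd)).contains K = true := by
      rw [PySem.Dict.contains_iff_mem_keys, pv_humans0_keys]
      exact (PySem.Set.mem_ofList _ _).mpr hKmem
    have hkeys2 : (((pvRawE sd).foldl pvStepA (pyA_humans0 hum (pvC sd), pyA_llm0 (pvC sd))).1.getD K PySem.Dict.empty).keys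
        = PySem.Set.ofList (pvC sd) := by
      have h := pv_foldA_keys2 (pvRawE sd) (pyA_humans0 hum (pvC sd), pyA_llm0 (pvC sd)) K
      simp only [] at h
      rw [h, hH0K, pv_inner0_keys]
    have hnd2 : (((pvRawE sd).foldl pvStepA (pyA_humans0 hum (pvC sd), pyA_llm0 (pvC sd))).1.getD K PySem.Dict.empty).keys.Nodup := by
      rw [hkeys2]; exact PySem.Set.nodup_ofList _
    have hndBi : (pyB_inner (pvC sd) (pvSetB sd) K).keys.Nodup := by
      rw [pv_innerB_keys]; exact PySem.Set.nodup_ofList _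
    rw [PySem.Dict.items_eq_map_keys _ hnd2 ([] : List Bool),
        PySem.Dict.items_eq_map_keys _ hndBi ([] : List Bool), hkeys2, pv_innerB_keys]
    apply List.map_congr_left
    intro c hcS
    have hcC : c ∈ pvC sd := (PySem.Set.mem_ofList _ _).mp hcS
    simp only [Prod.mk.injEq, true_and]
    have hcont2 : ((pyA_humans0 hum (pvC sd)).getD K PySem.Dict.empty).contains c = true := by
      rw [hH0K, PySem.Dict.contains_iff_mem_keys, pv_inner0_keys]
      exact (PySem.Set.mem_ofList _ _).mpr hcC
    have hAv := pv_foldA_getD (pvRawE sd) (pyA_humans0 hum (pvC sd), pyA_llm0 (pvC sd)) K c hcontK hcont2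
    simp only [] at hAv
    rw [hAv, hH0K, pv_inner0_getD (pvC sd) c hcC, pv_innerB_getD (pvC sd) (pvSetB sd) K c hcC]
    by_cases hEx : ∃ e ∈ pvRawE sd, e.2.2.length > 0 ∧ e.2.1 ≠ "LLM" ∧ "annotator" ++ e.2.1 = K ∧ e.1 = c
    · rw [if_pos hEx]
      have : PySem.Set.contains (pvSetB sd) (c, K) = true := by
        rw [← hKa] at hEx ⊢
        exact (pv_bridge_human sd a c).mpr hEx
      rw [this]
    · rw [if_neg hEx]
      have : PySem.Set.contains (pvSetB sd) (c, K) = false := by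
        rw [← hKa] at hEx ⊢
        rw [← Bool.not_eq_true]
        intro hcon
        exact hEx ((pv_bridge_human sd a c).mp hcon)
      rw [this]
  · -- LLM component
    have hkeysF : ((pvRawE sd).foldl pvStepA (pyA_humans0 hum (pvC sd), pyA_llm0 (pvC sd))).2.keys
        = PySem.Set.ofList (pvC sd) := by
      rw [pv_foldA_keysL]
      show (pyA_llm0 (pvC sd)).keys = _
      rw [pv_llm0_eq, pv_inner0_keys]
    have hndF : ((pvRawE sd).foldl pvStepA (pyA_humans0 hum (pvC sd), pyA_llm0 (pvC sd))).2.keys.Nodup := by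
      rw [hkeysF]; exact PySem.Set.nodup_ofList _
    have hndB : (pyB_llm (pvC sd) (pvSetB sd)).keys.Nodup := by
      rw [pv_llmB_eq, pv_innerB_keys]; exact PySem.Set.nodup_ofList _
    rw [PySem.Dict.items_eq_map_keys _ hndF ([] : List Bool),
        PySem.Dict.items_eq_map_keys _ hndB ([] : List Bool), hkeysF, pv_llmB_eq, pv_innerB_keys]
    apply List.map_congr_left
    intro c hcS
    have hcC : c ∈ pvC sd := (PySem.Set.mem_ofList _ _).mp hcS
    simp only [Prod.mk.injEq, true_and]
    have hcont : (pyA_llm0 (pvC sd)).contains c = true := by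
      rw [pv_llm0_eq, PySem.Dict.contains_iff_mem_keys, pv_inner0_keys]
      exact (PySem.Set.mem_ofList _ _).mpr hcC
    have hLv := pv_foldA_getDL (pvRawE sd) (pyA_humans0 hum (pvC sd), pyA_llm0 (pvC sd)) c hcont
    simp only [] at hLv
    rw [hLv]
    have h0 : (pyA_llm0 (pvC sd)).getD c [] = [false] := by
      rw [pv_llm0_eq]; exact pv_inner0_getD (pvC sd) c hcC
    have hB : (pyB_inner (pvC sd) (pvSetB sd) "LLM").getD c [] = [PySem.Set.contains (pvSetB sd) (c, "LLM")] :=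
      pv_innerB_getD (pvC sd) (pvSetB sd) "LLM" c hcC
    rw [h0, hB]
    by_cases hEx : ∃ e ∈ pvRawE sd, e.2.2.length > 0 ∧ e.2.1 = "LLM" ∧ e.1 = c
    · rw [if_pos hEx, (pv_bridge_llm sd c).mpr hEx]
    · rw [if_neg hEx]
      have : PySem.Set.contains (pvSetB sd) (c, "LLM") = false := by
        rw [← Bool.not_eq_true]
        intro hcon
        exact hEx ((pv_bridge_llm sd c).mp hcon)
      rw [this]

theorem pv_main (merged_groups_by_doc : List (String × List (List (String × List (String × List String)))))
    (all_annotators : List String) :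
    create_final_annotation_files merged_groups_by_doc all_annotators
      = create_final_annotation_files_alt merged_groups_by_doc all_annotators := by
  unfold create_final_annotation_files create_final_annotation_files_alt
  simp only [show pyB_sortedDocs = pyA_sortedDocs from rfl,
      show pyB_humanAnnotators = pyA_humanAnnotators from rfl,
      pv_B_flatten, pv_conceptsA_eq, pv_A_flatten]
  exact pv_core (pyA_sortedDocs merged_groups_by_doc) (pyA_humanAnnotators all_annotators)

-- ===== VERDICT (by name: the statement is the Claim_ definition above) =====
theorem create_final_annotation_files_spec : Claim_equal_create_final_annotation_files := by
  intro merged_groups_by_doc all_annotators _ _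
  unfold Spec_create_final_annotation_files
  exact pv_main merged_groups_by_doc all_annotators
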